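-- pv_equiv track=rewrite | github.com/AP-MI-2021/lab-567-deliasusca | Logic/crud.py | primeste_comanda_si_argumentele
-- ===== SOURCE A (Python) =====
-- def primeste_comanda_si_argumentele(linie_de_comanda):
--     """
--     Aceasta functie primeste o linie de comanda din care extrage comanda si argumentele.
--     Functia functioneaza pentru separatorul ',' (virgula).
--     Comanda este ceea ce a gasit inainte de pozitia primului separator.
--     Argumentele se afla dupa primul separator.
--     Ca sa poata lucra pe acestea, desparte sirurile (pot fi mai multe cuvinte la fiecare argument) gasite,
--     de fiecare data cand intalneste virgula.
--     :param linie_de_comanda: sir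
--     :return: comanda gasita si argumentele care vin cu aceasta
--     """
--     pozitie = linie_de_comanda.find(',')
--     if pozitie == -1:
--         return linie_de_comanda, []
--     comanda = linie_de_comanda[:pozitie]
--     argumente = linie_de_comanda[pozitie + 1:]
--     argumente = argumente.split(',')
--     for cuvant in argumente:
--         cuvant = cuvant.replace(',', '')
--     return comanda, argumente
-- ===== SOURCE B (Python) =====
-- def primeste_comanda_si_argumentele(linie_de_comanda):
--     comanda = None
--     curent = []
--     argumente = []
--     for ch in linie_de_comanda:
--         if ch == ',':
--             if comanda is None:
--                 comanda = ''.join(curent)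
--             else:
--                 argumente.append(''.join(curent))
--             curent = []
--         else:
--             curent.append(ch)
--     if comanda is None:
--         return ''.join(curent), []
--     argumente.append(''.join(curent))
--     return comanda, argumente
-- ===== Notes on version B (the rewrite author's own statement) =====
-- stated objective: alternative
-- what changed: A single explicit character scan with an accumulator (current token, command-found flag, argument list) replaces A's staged library calls: find the first comma, branch, slice out head and tail, then split the tail and run a dead per-word loop.
import Mathlib
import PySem

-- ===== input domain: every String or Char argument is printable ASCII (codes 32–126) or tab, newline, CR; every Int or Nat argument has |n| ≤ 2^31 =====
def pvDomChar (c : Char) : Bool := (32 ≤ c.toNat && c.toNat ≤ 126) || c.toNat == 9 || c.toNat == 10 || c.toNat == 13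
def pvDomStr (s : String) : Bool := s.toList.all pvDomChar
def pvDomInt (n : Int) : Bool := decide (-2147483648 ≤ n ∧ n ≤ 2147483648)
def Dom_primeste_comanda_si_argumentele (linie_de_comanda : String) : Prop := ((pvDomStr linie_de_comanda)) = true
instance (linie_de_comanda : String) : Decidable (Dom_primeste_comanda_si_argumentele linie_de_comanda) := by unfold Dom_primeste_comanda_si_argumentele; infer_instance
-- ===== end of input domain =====

-- B replaces A's staged find/branch/slice/split (with a dead per-word loop) by one explicit
-- character scan with an accumulator (current token, optional command, argument list): alternative decomposition.


-- ===== PORT A =====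
def primeste_comanda_si_argumentele (linie_de_comanda : String) : String × List String :=
  let pozitie := PySem.Str.find linie_de_comanda ","
  if pozitie = -1 then (linie_de_comanda, [])
  else
    let comanda := PySem.Str.slice linie_de_comanda none (some pozitie)
    let argumente := PySem.Str.slice linie_de_comanda (some (pozitie + 1)) none
    let argumente := (PySem.Str.split? argumente ",").getD []   -- sep "," ≠ "": never none
    -- Python's 'for cuvant in argumente: cuvant = cuvant.replace(...)' only rebinds a local;
    -- ported literally as a discarded map
    let _ := argumente.map (fun cuvant => PySem.Str.replace cuvant "," "")
    (comanda, argumente)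

-- ===== PORT B =====
-- one step of Source B's for-loop: state = (comanda : Option String, curent : List Char, argumente)
def bStep (st : Option String × List Char × List String) (ch : Char) :
    Option String × List Char × List String :=
  let (comanda, curent, argumente) := st
  if ch = ',' then
    match comanda with
    | none => (some (String.ofList curent), [], argumente)
    | some c => (some c, [], argumente ++ [String.ofList curent])
  else (comanda, curent ++ [ch], argumente)

def primeste_comanda_si_argumentele_alt (linie_de_comanda : String) : String × List String :=
  let st := linie_de_comanda.toList.foldl bStep (none, [], [])
  let (comanda, curent, argumente) := st
  match comanda with
  | none => (String.ofList curent, [])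
  | some c => (c, argumente ++ [String.ofList curent])

-- ===== PRECONDITION & SPEC =====
def Spec_primeste_comanda_si_argumentele (linie_de_comanda : String) (out : String × List String) : Prop := out = primeste_comanda_si_argumentele_alt linie_de_comanda
instance (linie_de_comanda : String) (out : String × List String) : Decidable (Spec_primeste_comanda_si_argumentele linie_de_comanda out) := by unfold Spec_primeste_comanda_si_argumentele; infer_instance

-- ===== CLAIM (what is proved, stated in full; the proofs are below) =====
def Claim_equal_primeste_comanda_si_argumentele : Prop := ∀ (linie_de_comanda : String), Dom_primeste_comanda_si_argumentele linie_de_comanda → Spec_primeste_comanda_si_argumentele linie_de_comanda (primeste_comanda_si_argumentele linie_de_comanda)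

-- ===== LEMMAS AND PROOFS =====

/-- Structural model of splitting a char list on ','. -/
def splitC : List Char → List (List Char)
  | [] => [[]]
  | c :: rest =>
    if c = ',' then [] :: splitC rest
    else
      match splitC rest with
      | [] => [[c]]
      | p :: ps => (c :: p) :: ps

theorem splitC_ne_nil (l : List Char) : splitC l ≠ [] := by
  cases l with
  | nil => simp [splitC]
  | cons c rest =>
    simp only [splitC]
    split
    · simp
    · split <;> simp

theorem splitOn_go_eq (fuel : Nat) : ∀ (l cur acc : _), l.length ≤ fuel →
    PySem.Chars.splitOn.go [','] fuel l cur acc =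
      acc.reverse ++ (match splitC l with
        | [] => []
        | p :: ps => (cur.reverse ++ p) :: ps) := by
  induction fuel with
  | zero =>
    intro l cur acc h
    have : l = [] := by cases l <;> simp_all
    subst this
    simp [PySem.Chars.splitOn.go, splitC]
  | succ f ih =>
    intro l cur acc h
    cases l with
    | nil => simp [PySem.Chars.splitOn.go, splitC]
    | cons c rest =>
      by_cases hc : c = ','
      · subst hc
        have : PySem.Chars.splitOn.go [','] (f+1) (',' :: rest) cur acc =
            PySem.Chars.splitOn.go [','] f rest [] (cur.reverse :: acc) := by
          simp [PySem.Chars.splitOn.go, List.isPrefixOf]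
        rw [this, ih rest [] (cur.reverse :: acc) (by simpa using h)]
        simp only [splitC, if_true]
        cases hs : splitC rest with
        | nil => exact absurd hs (splitC_ne_nil rest)
        | cons p ps => simp
      · have : PySem.Chars.splitOn.go [','] (f+1) (c :: rest) cur acc =
            PySem.Chars.splitOn.go [','] f rest (c :: cur) acc := by
          simp only [PySem.Chars.splitOn.go, List.isPrefixOf]
          simp [Ne.symm hc]
        rw [this, ih rest (c :: cur) acc (by simpa using h)]
        simp only [splitC, if_neg hc]
        cases hs : splitC rest with
        | nil => exact absurd hs (splitC_ne_nil rest)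
        | cons p ps => simp

theorem splitOn_eq_splitC (l : List Char) :
    PySem.Chars.splitOn l [','] = splitC l := by
  unfold PySem.Chars.splitOn
  rw [splitOn_go_eq (l.length + 1) l [] [] (by omega)]
  cases hs : splitC l with
  | nil => exact absurd hs (splitC_ne_nil l)
  | cons p ps => simp

theorem find_go_eq (l : List Char) : ∀ (k : Nat),
    PySem.Chars.find.go [','] l k =
      if ',' ∈ l then ((k : Int) + (l.takeWhile (· != ',')).length) else -1 := by
  induction l with
  | nil => intro k; simp [PySem.Chars.find.go]
  | cons c rest ih =>
    intro k
    by_cases hc : c = ','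
    · subst hc
      simp [PySem.Chars.find.go, List.isPrefixOf]
    · have : PySem.Chars.find.go [','] (c :: rest) k =
          PySem.Chars.find.go [','] rest (k + 1) := by
        simp only [PySem.Chars.find.go, List.isPrefixOf]
        simp [Ne.symm hc]
      rw [this, ih (k + 1)]
      by_cases hm : ',' ∈ rest
      · simp [hm, hc, Ne.symm hc]
        ring
      · simp [hm, Ne.symm hc]

theorem splitC_of_not_mem (l : List Char) (h : ',' ∉ l) : splitC l = [l] := by
  induction l with
  | nil => simp [splitC]
  | cons c rest ih =>
    simp only [List.mem_cons, not_or] at h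
    have hc : ¬ c = ',' := fun hc => h.1 hc.symm
    simp [splitC, hc, ih h.2]

theorem splitC_of_mem (l : List Char) (h : ',' ∈ l) :
    splitC l = l.takeWhile (· != ',') :: splitC ((l.dropWhile (· != ',')).tail) := by
  induction l with
  | nil => simp at h
  | cons c rest ih =>
    by_cases hc : c = ','
    · subst hc
      simp [splitC]
    · have hm : ',' ∈ rest := by
        rcases List.mem_cons.mp h with h' | h'
        · exact absurd h'.symm hc
        · exact h'
      simp only [splitC, if_neg hc, ih hm]
      simp [hc]

theorem take_takeWhile_len (l : List Char) :
    l.take (l.takeWhile (· != ',')).length = l.takeWhile (· != ',') := by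
  obtain ⟨t, d, ht, hl⟩ : ∃ t d, t = l.takeWhile (· != ',') ∧ l = t ++ d :=
    ⟨_, _, rfl, (l.takeWhile_append_dropWhile (p := (· != ','))).symm⟩
  rw [← ht, hl]
  exact List.take_left

theorem drop_takeWhile_len_succ (l : List Char) :
    l.drop ((l.takeWhile (· != ',')).length + 1) = (l.dropWhile (· != ',')).tail := by
  have h1 : l.drop (l.takeWhile (· != ',')).length = l.dropWhile (· != ',') := by
    obtain ⟨t, d, ht, hd, hl⟩ :
        ∃ t d, t = l.takeWhile (· != ',') ∧ d = l.dropWhile (· != ',') ∧ l = t ++ d :=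
      ⟨_, _, rfl, rfl, (l.takeWhile_append_dropWhile (p := (· != ','))).symm⟩
    rw [← ht, ← hd, hl]
    exact List.drop_left
  rw [← List.tail_drop, h1]

/-- A's value, characterised through splitC. -/
theorem A_eq_splitC (s : String) :
    primeste_comanda_si_argumentele s =
      match splitC s.toList with
      | [] => ("", [])
      | p :: ps => (String.ofList p, ps.map String.ofList) := by
  unfold primeste_comanda_si_argumentele
  have hfind : PySem.Str.find s "," =
      if ',' ∈ s.toList then (((s.toList.takeWhile (· != ',')).length : Nat) : Int) else -1 := by
    rw [PySem.Str.find_eq]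
    show PySem.Chars.find.go (",".toList) _ _ = _
    rw [show (",".toList) = [','] from rfl, find_go_eq s.toList 0]
    split <;> simp
  have hsplit : ∀ t : String, (PySem.Str.split? t ",").getD [] =
      (splitC t.toList).map String.ofList := by
    intro t
    simp [PySem.Str.split?, PySem.Chars.split?, List.isEmpty, splitOn_eq_splitC]
  by_cases hm : ',' ∈ s.toList
  · set k := (s.toList.takeWhile (· != ',')).length with hk
    rw [hfind, if_pos hm]
    have hne : ((k : Nat) : Int) ≠ -1 := by omega
    rw [if_neg hne]
    simp only [hsplit]
    rw [splitC_of_mem s.toList hm]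
    refine Prod.ext ?_ ?_
    · apply String.toList_inj.mp
      simp only [PySem.Str.toList_slice, PySem.Chars.slice_eq_listSlice]
      rw [show ((k : Int)) = (((k : Nat)) : Int) from rfl, PySem.List.slice_to_natCast,
        take_takeWhile_len]
      exact String.toList_ofList.symm
    · have harg : (PySem.Str.slice s (some ((k : Int) + 1)) none).toList
          = (s.toList.dropWhile (· != ',')).tail := by
        simp [PySem.Str.toList_slice, PySem.Chars.slice_eq_listSlice]
        rw [show ((k : Int) + 1) = (((k + 1 : Nat)) : Int) by push_cast; ring,
          PySem.List.slice_from_natCast]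
        exact drop_takeWhile_len_succ s.toList
      rw [← harg]
  · rw [hfind, if_neg hm, if_pos rfl]
    rw [splitC_of_not_mem s.toList hm]
    simp [String.ofList_toList]

-- last / dropLast of a nonempty piece list (p :: ps), structured for the fold lemmas
def lastPiece (p : List Char) : List (List Char) → List Char
  | [] => p
  | q :: qs => lastPiece q qs

def dropLastP (p : List Char) : List (List Char) → List (List Char)
  | [] => []
  | q :: qs => p :: dropLastP q qs

theorem dropLastP_lastPiece : ∀ (ps : List (List Char)) (p : List Char),
    dropLastP p ps ++ [lastPiece p ps] = p :: ps := by
  intro ps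
  induction ps with
  | nil => intro p; simp [dropLastP, lastPiece]
  | cons q qs ih => intro p; simp [dropLastP, lastPiece, ih q]

theorem fold_some (c : String) : ∀ (l cur : List Char) (acc : List String),
    List.foldl bStep (some c, cur, acc) l =
      match splitC l with
      | [] => (some c, cur, acc)
      | p :: ps => (some c, lastPiece (cur ++ p) ps,
          acc ++ (dropLastP (cur ++ p) ps).map String.ofList) := by
  intro l
  induction l with
  | nil => intro cur acc; simp [splitC, lastPiece, dropLastP]
  | cons ch rest ih =>
    intro cur acc
    by_cases hc : ch = ','
    · subst hc
      have hstep : bStep (some c, cur, acc) ',' =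
          (some c, [], acc ++ [String.ofList cur]) := by simp [bStep]
      rw [List.foldl_cons, hstep, ih [] (acc ++ [String.ofList cur])]
      simp only [splitC, if_true]
      cases hs : splitC rest with
      | nil => exact absurd hs (splitC_ne_nil rest)
      | cons p ps => simp [dropLastP, lastPiece]
    · have hstep : bStep (some c, cur, acc) ch = (some c, cur ++ [ch], acc) := by
        simp [bStep, hc]
      rw [List.foldl_cons, hstep, ih (cur ++ [ch]) acc]
      simp only [splitC, if_neg hc]
      cases hs : splitC rest with
      | nil => exact absurd hs (splitC_ne_nil rest)
      | cons p ps => simp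

theorem fold_none : ∀ (l cur : List Char),
    List.foldl bStep (none, cur, []) l =
      match splitC l with
      | [] => (none, cur, [])
      | [p] => (none, cur ++ p, [])
      | p :: q :: qs => (some (String.ofList (cur ++ p)), lastPiece q qs,
          (dropLastP q qs).map String.ofList) := by
  intro l
  induction l with
  | nil => intro cur; simp [splitC]
  | cons ch rest ih =>
    intro cur
    by_cases hc : ch = ','
    · subst hc
      have hstep : bStep (none, cur, []) ',' = (some (String.ofList cur), [], []) := by
        simp [bStep]
      rw [List.foldl_cons, hstep, fold_some (String.ofList cur) rest [] []]
      simp only [splitC, if_true]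
      cases hs : splitC rest with
      | nil => exact absurd hs (splitC_ne_nil rest)
      | cons p ps => simp
    · have hstep : bStep (none, cur, []) ch = (none, cur ++ [ch], []) := by
        simp [bStep, hc]
      rw [List.foldl_cons, hstep, ih (cur ++ [ch])]
      simp only [splitC, if_neg hc]
      cases hs : splitC rest with
      | nil => exact absurd hs (splitC_ne_nil rest)
      | cons p ps =>
        cases ps with
        | nil => simp
        | cons q qs => simp

/-- B's value, characterised through splitC. -/
theorem B_eq_splitC (s : String) :
    primeste_comanda_si_argumentele_alt s =
      match splitC s.toList with
      | [] => ("", [])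
      | p :: ps => (String.ofList p, ps.map String.ofList) := by
  unfold primeste_comanda_si_argumentele_alt
  rw [fold_none s.toList []]
  cases hs : splitC s.toList with
  | nil => exact absurd hs (splitC_ne_nil s.toList)
  | cons p ps =>
    cases ps with
    | nil => simp
    | cons q qs =>
      simp only [List.nil_append]
      have h := dropLastP_lastPiece qs q
      have : (dropLastP q qs).map String.ofList ++ [String.ofList (lastPiece q qs)] =
          (q :: qs).map String.ofList := by
        rw [← h]; simp
      simp [this]

-- ===== VERDICT (by name: the statement is the Claim_ definition above) =====
theorem primeste_comanda_si_argumentele_spec : Claim_equal_primeste_comanda_si_argumentele := by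
  intro s _
  unfold Spec_primeste_comanda_si_argumentele
  rw [A_eq_splitC, B_eq_splitC]
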